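-- pv_equiv track=rewrite | github.com/meengcoon/Diaries-system | pipeline/privacy_gate.py | _collect_candidates_lexicon
-- ===== SOURCE A (Python) =====
-- from typing import Any, Dict, Iterable, List, Tuple
--
-- def _collect_candidates_lexicon(text: str, entity_hints: Dict[str, Iterable[str]]) -> List[Tuple[str, str]]:
--     out: List[Tuple[str, str]] = []
--     for et in ("PERSON", "ORG", "LOC"):
--         for item in entity_hints.get(et, []) or []:
--             s = str(item or "").strip()
--             if s and s in text:
--                 out.append((et, s))
--     return out
-- ===== SOURCE B (Python) =====
-- def _collect_candidates_lexicon(text, entity_hints):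
--     # Different algorithm: instead of running a substring search over `text` for
--     # every hint, scan `text` once per distinct hint length, collecting the set of
--     # window substrings that are hints, then emit the pairs in the original order.
--     ets = ("PERSON", "ORG", "LOC")
--     stripped = [(et, [str(it or "").strip() for it in (entity_hints.get(et, []) or [])])
--                 for et in ets]
--     patterns = {s for _, ss in stripped for s in ss if s}
--     n = len(text)
--     lengths = {len(s) for s in patterns if len(s) <= n}
--     found = {text[i:i + L] for L in lengths
--              for i in range(n - L + 1) if text[i:i + L] in patterns}
--     return [(et, s) for et, ss in stripped for s in ss if s and s in found]
-- ===== Notes on version B (the rewrite author's own statement) =====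
-- stated objective: alternative
-- what changed: Instead of running a substring search over the text for every hint, B strips all hints once, forms the set of nonempty patterns, scans the text with a sliding window once per distinct pattern length to collect the set of patterns that occur, and then emits the (type, hint) pairs in the original order by set lookup.
import Mathlib
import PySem

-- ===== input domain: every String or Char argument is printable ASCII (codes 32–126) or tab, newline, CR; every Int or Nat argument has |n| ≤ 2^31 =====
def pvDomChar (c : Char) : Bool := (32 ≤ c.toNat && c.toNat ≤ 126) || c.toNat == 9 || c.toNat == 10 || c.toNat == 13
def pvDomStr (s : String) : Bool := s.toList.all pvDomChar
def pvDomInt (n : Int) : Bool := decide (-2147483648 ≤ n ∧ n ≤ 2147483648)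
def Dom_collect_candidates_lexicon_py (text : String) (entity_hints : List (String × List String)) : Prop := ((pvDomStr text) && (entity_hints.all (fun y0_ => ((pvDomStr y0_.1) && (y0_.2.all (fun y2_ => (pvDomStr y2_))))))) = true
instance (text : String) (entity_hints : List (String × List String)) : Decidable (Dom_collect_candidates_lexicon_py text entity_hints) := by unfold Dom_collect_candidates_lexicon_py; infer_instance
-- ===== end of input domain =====

-- B replaces the per-hint substring search over `text` by one windowed scan of `text`
-- per distinct hint length against the hint set (alternative algorithm, same result).

-- ===== PORT A =====
-- literal port of A: for each of the three fixed entity types, iterate its hints,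
-- strip (str(item or "").strip() = item.strip() for a str item), test `s in text`, append.
def collect_candidates_lexicon_py (text : String) (entity_hints : List (String × List String)) : List (String × String) :=
  (["PERSON", "ORG", "LOC"] : List String).foldl (fun out et =>
    (PySem.Dict.getD ⟨entity_hints⟩ et []).foldl (fun out item =>
      let s := PySem.Str.strip item
      if decide (s.toList ≠ []) && PySem.Str.isIn s text then out ++ [(et, s)] else out) out) []

-- ===== PORT B =====
-- literal port of Source B: strip everything once, collect the set of (nonempty) patterns,
-- scan text once per distinct pattern length collecting the windows that are patterns,
-- then emit pairs in the original order by set lookup.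
def collect_candidates_lexicon_py_alt (text : String) (entity_hints : List (String × List String)) : List (String × String) :=
  let ets : List String := ["PERSON", "ORG", "LOC"]
  let stripped : List (String × List String) :=
    ets.map (fun et => (et, (PySem.Dict.getD ⟨entity_hints⟩ et []).map PySem.Str.strip))
  let patterns : PySem.Set String :=
    PySem.Set.ofList (List.filter (fun s => decide (s.toList ≠ [])) (stripped.flatMap (fun p => p.2)))
  let n : Int := PySem.Str.len text
  let lengths : PySem.Set Int :=
    PySem.Set.ofList (List.map (fun s => PySem.Str.len s) (List.filter (fun s => PySem.Str.len s ≤ n) patterns))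
  let found : PySem.Set String :=
    PySem.Set.ofList (lengths.flatMap (fun L =>
      List.filter (fun w => PySem.Set.contains patterns w)
        (List.map (fun i => PySem.Str.slice text (some i) (some (i + L))) (PySem.List.pyRange 0 (n - L + 1) 1))))
  stripped.flatMap (fun p =>
    List.map (fun s => (p.1, s))
      (List.filter (fun s => decide (s.toList ≠ []) && PySem.Set.contains found s) p.2))

-- ===== PRECONDITION & SPEC =====
def Spec_collect_candidates_lexicon_py (text : String) (entity_hints : List (String × List String)) (out : List (String × String)) : Prop := out = collect_candidates_lexicon_py_alt text entity_hints
instance (text : String) (entity_hints : List (String × List String)) (out : List (String × String)) : Decidable (Spec_collect_candidates_lexicon_py text entity_hints out) := by unfold Spec_collect_candidates_lexicon_py; infer_instance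

-- ===== CLAIM (what is proved, stated in full; the proofs are below) =====
def Claim_equal_collect_candidates_lexicon_py : Prop := ∀ (text : String) (entity_hints : List (String × List String)), Dom_collect_candidates_lexicon_py text entity_hints → Spec_collect_candidates_lexicon_py text entity_hints (collect_candidates_lexicon_py text entity_hints)

-- ===== LEMMAS AND PROOFS =====

-- proof-side names for the let-bound values of port B
def pvStripped (entity_hints : List (String × List String)) : List (String × List String) :=
  (["PERSON", "ORG", "LOC"] : List String).map (fun et => (et, (PySem.Dict.getD ⟨entity_hints⟩ et []).map PySem.Str.strip))

def pvP (entity_hints : List (String × List String)) : List String :=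
  List.filter (fun s => decide (s.toList ≠ [])) ((pvStripped entity_hints).flatMap (fun p => p.2))

def pvLS (text : String) (entity_hints : List (String × List String)) : List Int :=
  PySem.Set.ofList (List.map (fun s => PySem.Str.len s)
    (List.filter (fun s => PySem.Str.len s ≤ PySem.Str.len text) (PySem.Set.ofList (pvP entity_hints))))

def pvScan (text : String) (entity_hints : List (String × List String)) : List String :=
  (pvLS text entity_hints).flatMap (fun L =>
    List.filter (fun w => PySem.Set.contains (PySem.Set.ofList (pvP entity_hints)) w)
      (List.map (fun i => PySem.Str.slice text (some i) (some (i + L)))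
        (PySem.List.pyRange 0 (PySem.Str.len text - L + 1) 1)))

def pvFound (text : String) (entity_hints : List (String × List String)) : PySem.Set String :=
  PySem.Set.ofList (pvScan text entity_hints)

lemma alt_eq (text : String) (entity_hints : List (String × List String)) :
    collect_candidates_lexicon_py_alt text entity_hints =
      (pvStripped entity_hints).flatMap (fun p =>
        List.map (fun s => (p.1, s))
          (List.filter (fun s => decide (s.toList ≠ []) && PySem.Set.contains (pvFound text entity_hints) s) p.2)) := rfl

-- core: a string is produced by the windowed scan iff it is a pattern occurring in text
lemma mem_pvScan_iff (text : String) (entity_hints : List (String × List String)) (s : String)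
    (hsP : s ∈ pvP entity_hints) :
    s ∈ pvScan text entity_hints ↔ PySem.Str.isIn s text = true := by
  rw [pvScan]
  constructor
  · intro h
    obtain ⟨L, hL, hw⟩ := List.mem_flatMap.1 h
    rw [List.mem_filter] at hw
    obtain ⟨i, hi, hsl⟩ := List.mem_map.1 hw.1
    rw [PySem.List.mem_pyRange_one] at hi
    have hL0 : 0 ≤ L := by
      rw [pvLS, PySem.Set.mem_ofList] at hL
      obtain ⟨u, _, rfl⟩ := List.mem_map.1 hL
      simp [PySem.Str.len_eq]
    rw [PySem.Str.isIn_eq]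
    apply (PySem.Chars.exists_prefix_drop_iff_isIn _ _).1
    refine ⟨i.toNat, ?_⟩
    rw [← hsl, PySem.Str.toList_slice, PySem.Chars.slice_eq_listSlice,
      PySem.List.slice_toNat _ hi.1 (by omega)]
    exact List.take_prefix _ _
  · intro hin
    rw [PySem.Str.isIn_eq] at hin
    obtain ⟨j, hpre⟩ := (PySem.Chars.exists_prefix_drop_iff_isIn _ _).2 hin
    have hdrop : text.toList.drop j = text.toList.drop (min j text.toList.length) := by
      rcases le_total j text.toList.length with h | h
      · rw [min_eq_left h]
      · rw [List.drop_eq_nil_of_le h, List.drop_eq_nil_of_le (by omega)]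
    rw [hdrop] at hpre
    have hlen : s.toList.length ≤ text.toList.length - min j text.toList.length := by
      have := hpre.length_le
      simpa using this
    have hkn : min j text.toList.length ≤ text.toList.length := min_le_right _ _
    have hLmem : PySem.Str.len s ∈ pvLS text entity_hints := by
      rw [pvLS, PySem.Set.mem_ofList]
      refine List.mem_map.2 ⟨s, ?_, rfl⟩
      rw [List.mem_filter]
      refine ⟨(PySem.Set.mem_ofList _ _).2 hsP, ?_⟩
      simp only [PySem.Str.len_eq, decide_eq_true_eq, Int.ofNat_le]
      omega
    refine List.mem_flatMap.2 ⟨PySem.Str.len s, hLmem, ?_⟩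
    rw [List.mem_filter]
    constructor
    · refine List.mem_map.2 ⟨((min j text.toList.length : Nat) : Int), ?_, ?_⟩
      · rw [PySem.List.mem_pyRange_one]
        simp only [PySem.Str.len_eq]
        constructor
        · positivity
        · push_cast
          omega
      · refine String.toList_inj.mp ?_
        rw [PySem.Str.toList_slice, PySem.Chars.slice_eq_listSlice,
          PySem.List.slice_toNat _ (by positivity) (by simp [PySem.Str.len_eq]; positivity)]
        have harith : (((min j text.toList.length : Nat) : Int) + PySem.Str.len s).toNat
            - ((min j text.toList.length : Nat) : Int).toNat = s.toList.length := by
          simp only [PySem.Str.len_eq]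
          omega
        rw [harith, Int.toNat_natCast]
        exact (List.prefix_iff_eq_take.1 hpre).symm
    · exact (PySem.Set.contains_iff _ _).2 ((PySem.Set.mem_ofList _ _).2 hsP)

lemma contains_pvFound (text : String) (entity_hints : List (String × List String)) (s : String)
    (hsP : s ∈ pvP entity_hints) :
    PySem.Set.contains (pvFound text entity_hints) s = PySem.Str.isIn s text := by
  rw [Bool.eq_iff_iff, PySem.Set.contains_iff, pvFound, PySem.Set.mem_ofList,
    mem_pvScan_iff text entity_hints s hsP]

-- one entity type: A's inner append loop equals B's filter of the stripped list
lemma per_et (text : String) (entity_hints : List (String × List String)) (et : String)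
    (hs : List String) (acc : List (String × String))
    (hcov : ∀ item ∈ hs, (PySem.Str.strip item).toList ≠ [] → PySem.Str.strip item ∈ pvP entity_hints) :
    hs.foldl (fun out item =>
        let s := PySem.Str.strip item
        if decide (s.toList ≠ []) && PySem.Str.isIn s text then out ++ [(et, s)] else out) acc
      = acc ++ List.map (fun s => (et, s))
          (List.filter (fun s => decide (s.toList ≠ []) && PySem.Set.contains (pvFound text entity_hints) s)
            (hs.map PySem.Str.strip)) := by
  induction hs generalizing acc with
  | nil => simp
  | cons item tl ih =>
    have hcov' : ∀ i ∈ tl, (PySem.Str.strip i).toList ≠ [] → PySem.Str.strip i ∈ pvP entity_hints :=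
      fun i hi => hcov i (List.mem_cons_of_mem _ hi)
    have hc : (decide ((PySem.Str.strip item).toList ≠ []) && PySem.Str.isIn (PySem.Str.strip item) text)
        = (decide ((PySem.Str.strip item).toList ≠ []) &&
            PySem.Set.contains (pvFound text entity_hints) (PySem.Str.strip item)) := by
      by_cases hne : (PySem.Str.strip item).toList ≠ []
      · rw [contains_pvFound text entity_hints _ (hcov item List.mem_cons_self hne)]
      · have h0 : decide ((PySem.Str.strip item).toList ≠ []) = false := by
          simp only [decide_not, Bool.not_eq_false', decide_eq_true_eq]
          exact not_not.mp hne
        rw [h0, Bool.false_and, Bool.false_and]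
    rw [List.foldl_cons, ih _ hcov']
    simp only [List.map_cons, List.filter_cons, hc]
    split
    · simp
    · simp

-- ===== VERDICT (by name: the statement is the Claim_ definition above) =====
theorem collect_candidates_lexicon_py_spec : Claim_equal_collect_candidates_lexicon_py := by
  intro text entity_hints _
  unfold Spec_collect_candidates_lexicon_py
  rw [alt_eq]
  have hcov : ∀ et ∈ (["PERSON", "ORG", "LOC"] : List String),
      ∀ item ∈ PySem.Dict.getD ⟨entity_hints⟩ et [],
        (PySem.Str.strip item).toList ≠ [] → PySem.Str.strip item ∈ pvP entity_hints := by
    intro et het item hitem hne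
    unfold pvP pvStripped
    rw [List.mem_filter]
    refine ⟨List.mem_flatMap.2 ⟨(et, (PySem.Dict.getD ⟨entity_hints⟩ et []).map PySem.Str.strip), ?_, ?_⟩, by simpa using hne⟩
    · exact List.mem_map.2 ⟨et, het, rfl⟩
    · exact List.mem_map.2 ⟨item, hitem, rfl⟩
  unfold collect_candidates_lexicon_py pvStripped
  simp only [List.foldl_cons, List.foldl_nil, List.map_cons, List.map_nil,
    List.flatMap_cons, List.flatMap_nil]
  rw [per_et text entity_hints _ _ _ (hcov _ (by simp)),
      per_et text entity_hints _ _ _ (hcov _ (by simp)),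
      per_et text entity_hints _ _ _ (hcov _ (by simp))]
  simp
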